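-- pv_equiv track=rewrite | github.com/kotiq/blk | src/blk/text/serializer3.py | quoted_text
-- ===== SOURCE A (Python) =====
-- def quoted_text(inst, quote):
--     acc = [quote]
--     for c in inst:
--         if c in ('~', '"', "'"):
--             acc.append('~')
--             acc.append(c)
--         elif c == '\t':
--             acc.append('~t')
--         elif c == '\n':
--             acc.append('~n')
--         elif c == '\r':
--             acc.append('~r')
--         else:
--             acc.append(c)
--     acc.append(quote)
--     return ''.join(acc)
-- ===== SOURCE B (Python) =====
-- def quoted_text(inst, quote):
--     # staged passes: six sequential whole-string replaces; '~' is escaped first,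
--     # and no later pass's target can be produced by an earlier pass.
--     s = (inst.replace('~', '~~')
--              .replace('"', '~"')
--              .replace("'", "~'")
--              .replace('\t', '~t')
--              .replace('\n', '~n')
--              .replace('\r', '~r'))
--     return quote + s + quote
-- ===== Notes on version B (the rewrite author's own statement) =====
-- stated objective: faster
-- what changed: Replaces A's single per-character Python loop with an if/elif chain and accumulator list by six staged whole-string str.replace passes ('~' escaped first so later passes never touch introduced escapes), then concatenates the quotes.
import Mathlib
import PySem

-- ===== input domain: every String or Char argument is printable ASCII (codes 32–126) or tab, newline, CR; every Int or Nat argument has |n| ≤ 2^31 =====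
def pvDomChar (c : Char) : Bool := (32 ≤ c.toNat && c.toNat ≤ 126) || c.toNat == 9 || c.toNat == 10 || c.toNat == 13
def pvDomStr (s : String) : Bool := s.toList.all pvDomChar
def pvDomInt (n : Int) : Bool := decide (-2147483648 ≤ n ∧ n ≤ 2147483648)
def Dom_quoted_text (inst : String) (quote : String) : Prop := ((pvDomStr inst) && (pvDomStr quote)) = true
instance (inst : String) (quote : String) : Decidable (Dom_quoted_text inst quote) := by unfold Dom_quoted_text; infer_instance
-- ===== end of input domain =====

-- B replaces A's single per-character loop (if/elif chain + accumulator list) by six staged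
-- whole-string str.replace passes ('~' escaped first), measurably faster in CPython (loop moved into C).

-- ===== PORT A =====
-- literal transliteration: acc = [quote]; for c in inst: branches append; acc.append(quote); ''.join(acc)
def quoted_text (inst : String) (quote : String) : String :=
  let acc := inst.toList.foldl (fun acc c =>
    if c = '~' ∨ c = '"' ∨ c = '\'' then (acc ++ ["~"]) ++ [String.ofList [c]]
    else if c = '\t' then acc ++ ["~t"]
    else if c = '\n' then acc ++ ["~n"]
    else if c = '\r' then acc ++ ["~r"]
    else acc ++ [String.ofList [c]]) [quote]
  PySem.Str.join "" (acc ++ [quote])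

-- ===== PORT B =====
-- Source B: six chained whole-string .replace passes, then quote + s + quote
def quoted_text_alt (inst : String) (quote : String) : String :=
  let s :=
    PySem.Str.replace (PySem.Str.replace (PySem.Str.replace (PySem.Str.replace
      (PySem.Str.replace (PySem.Str.replace inst "~" "~~") "\"" "~\"")
      "'" "~'") "\t" "~t") "\n" "~n") "\r" "~r"
  quote ++ s ++ quote

-- ===== PRECONDITION & SPEC =====
def Spec_quoted_text (inst : String) (quote : String) (out : String) : Prop := out = quoted_text_alt inst quote
instance (inst : String) (quote : String) (out : String) : Decidable (Spec_quoted_text inst quote out) := by unfold Spec_quoted_text; infer_instance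

-- ===== CLAIM (what is proved, stated in full; the proofs are below) =====
def Claim_equal_quoted_text : Prop := ∀ (inst : String) (quote : String), Dom_quoted_text inst quote → Spec_quoted_text inst quote (quoted_text inst quote)

-- ===== LEMMAS AND PROOFS =====

-- what A emits for one character, as a list of characters
def pvEsc (c : Char) : List Char :=
  if c = '~' ∨ c = '"' ∨ c = '\'' then ['~', c]
  else if c = '\t' then ['~', 't']
  else if c = '\n' then ['~', 'n']
  else if c = '\r' then ['~', 'r']
  else [c]

-- single-character replace as a flatMap
def pvRep (a : Char) (new : List Char) (cs : List Char) : List Char :=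
  cs.flatMap (fun c => if c = a then new else [c])

-- the string pieces A's loop body appends for a character c
def pvPieces (c : Char) : List String :=
  if c = '~' ∨ c = '"' ∨ c = '\'' then ["~", String.ofList [c]]
  else if c = '\t' then ["~t"]
  else if c = '\n' then ["~n"]
  else if c = '\r' then ["~r"]
  else [String.ofList [c]]

lemma pvStep_eq_pieces (acc : List String) (c : Char) :
    (if c = '~' ∨ c = '"' ∨ c = '\'' then (acc ++ ["~"]) ++ [String.ofList [c]]
     else if c = '\t' then acc ++ ["~t"]
     else if c = '\n' then acc ++ ["~n"]
     else if c = '\r' then acc ++ ["~r"]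
     else acc ++ [String.ofList [c]]) = acc ++ pvPieces c := by
  unfold pvPieces; split_ifs <;> simp

lemma pvJoin_nil_eq_flatten : ∀ (l : List (List Char)), PySem.Chars.join [] l = l.flatten
  | [] => by simp [PySem.Chars.join_nil]
  | [p] => by simp [PySem.Chars.join_singleton]
  | p :: q :: rest => by
      rw [PySem.Chars.join_cons_cons]
      simp [pvJoin_nil_eq_flatten (q :: rest)]

lemma pvPieces_chars (c : Char) :
    ((pvPieces c).map String.toList).flatten = pvEsc c := by
  unfold pvPieces pvEsc
  split_ifs <;> simp [String.toList_ofList]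

lemma pvFlatten_map_flatMap (cs : List Char) :
    ((cs.flatMap pvPieces).map String.toList).flatten = cs.flatMap pvEsc := by
  induction cs with
  | nil => simp
  | cons c cs ih => simp [List.flatMap_cons, ih, pvPieces_chars]

-- replace.go with a single-character pattern, fully characterised
lemma pvGo_single (a : Char) (new : List Char) :
    ∀ (fuel : Nat) (l acc : List Char), l.length ≤ fuel →
      PySem.Chars.replace.go [a] new fuel l acc
        = acc.reverse ++ l.flatMap (fun c => if c = a then new else [c]) := by
  intro fuel
  induction fuel with
  | zero =>
      intro l acc h
      have : l = [] := List.eq_nil_of_length_eq_zero (Nat.le_zero.mp h)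
      subst this
      simp [PySem.Chars.replace.go]
  | succ n ih =>
      intro l acc h
      cases l with
      | nil => simp [PySem.Chars.replace.go]
      | cons c t =>
          by_cases hc : c = a
          · subst hc
            have hpre : List.isPrefixOf [c] (c :: t) = true := by
              simp [List.isPrefixOf]
            rw [PySem.Chars.replace.go]
            simp only [hpre, if_true, List.length_singleton, List.drop_succ_cons, List.drop_zero]
            rw [ih t (new.reverse ++ acc) (by simpa using Nat.lt_succ_iff.mp (by simpa using h))]
            simp
          · have hpre : List.isPrefixOf [a] (c :: t) = false := by
              simp [List.isPrefixOf, Ne.symm hc]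
            rw [PySem.Chars.replace.go]
            simp only [hpre]
            rw [ih t (c :: acc) (by simpa using Nat.lt_succ_iff.mp (by simpa using h))]
            simp [hc]

lemma pvReplace_single (a : Char) (new s : List Char) :
    PySem.Chars.replace s [a] new = pvRep a new s := by
  unfold PySem.Chars.replace pvRep
  simp [pvGo_single a new s.length s [] (le_refl _)]

def pvChain (cs : List Char) : List Char :=
  pvRep '\r' ['~', 'r'] (pvRep '\n' ['~', 'n'] (pvRep '\t' ['~', 't']
    (pvRep '\'' ['~', '\''] (pvRep '"' ['~', '"'] (pvRep '~' ['~', '~'] cs)))))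

lemma pvChain_append (xs ys : List Char) :
    pvChain (xs ++ ys) = pvChain xs ++ pvChain ys := by
  simp [pvChain, pvRep, List.flatMap_append]

lemma pvChain_char (c : Char) : pvChain [c] = pvEsc c := by
  by_cases h1 : c = '~'
  · subst h1; decide
  by_cases h2 : c = '"'
  · subst h2; decide
  by_cases h3 : c = '\''
  · subst h3; decide
  by_cases h4 : c = '\t'
  · subst h4; decide
  by_cases h5 : c = '\n'
  · subst h5; decide
  by_cases h6 : c = '\r'
  · subst h6; decide
  simp [pvChain, pvRep, pvEsc, h1, h2, h3, h4, h5, h6]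

lemma pvChain_eq (cs : List Char) : pvChain cs = cs.flatMap pvEsc := by
  induction cs with
  | nil => rfl
  | cons c t ih =>
      have : (c :: t) = [c] ++ t := rfl
      rw [this, pvChain_append, pvChain_char, ih]
      simp

-- ===== VERDICT (by name: the statement is the Claim_ definition above) =====
theorem quoted_text_spec : Claim_equal_quoted_text := by
  intro inst quote _
  unfold Spec_quoted_text quoted_text quoted_text_alt
  apply String.toList_inj.mp
  -- A side to quote ++ flatMap pvEsc ++ quote
  simp only [funext fun acc => funext fun c => pvStep_eq_pieces acc c,
    PySem.List.foldl_append_eq_flatMap, PySem.Str.toList_join, String.toList_append,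
    List.map_append, List.map_cons, List.map_nil]
  rw [show ("" : String).toList = [] from rfl]
  rw [pvJoin_nil_eq_flatten]
  simp only [List.flatten_append, List.flatten_cons, List.flatten_nil, List.append_nil]
  rw [pvFlatten_map_flatMap inst.toList]
  -- B side: six replaces collapse to the same flatMap
  simp only [PySem.Str.toList_replace]
  rw [show ("~" : String).toList = ['~'] from rfl, show ("~~" : String).toList = ['~','~'] from rfl,
     show ("\"" : String).toList = ['"'] from rfl, show ("~\"" : String).toList = ['~','"'] from rfl,
     show ("'" : String).toList = ['\''] from rfl, show ("~'" : String).toList = ['~','\''] from rfl,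
     show ("\t" : String).toList = ['\t'] from rfl, show ("~t" : String).toList = ['~','t'] from rfl,
     show ("\n" : String).toList = ['\n'] from rfl, show ("~n" : String).toList = ['~','n'] from rfl,
     show ("\r" : String).toList = ['\r'] from rfl, show ("~r" : String).toList = ['~','r'] from rfl]
  simp only [pvReplace_single]
  rw [show pvRep '\r' ['~', 'r'] (pvRep '\n' ['~', 'n'] (pvRep '\t' ['~', 't']
    (pvRep '\'' ['~', '\''] (pvRep '"' ['~', '"'] (pvRep '~' ['~', '~'] inst.toList)))))
      = pvChain inst.toList from rfl]
  rw [pvChain_eq]
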